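-- pv_equiv track=rewrite | github.com/MikeN64/WordSearcher | WordSearcher.py | ban_letters
-- ===== SOURCE A (Python) =====
-- def ban_letters(letters, words):
--     if letters == []:
--         return words
--
--     result = []
--     letter = letters.pop()
--     for word in words:
--         if letter not in word:
--             result.append(word)
--
--     return ban_letters(letters, result)
-- ===== SOURCE B (Python) =====
-- def ban_letters(letters, words):
--     result = words
--     while letters:
--         letter = letters.pop()
--         result = [w for w in result if letter not in w]
--     return result
-- ===== Notes on version B (the rewrite author's own statement) =====
-- stated objective: simpler
-- what changed: Replaces A's recursive peel-and-refilter (building each filtered list by appends and recursing) with an iterative while loop that pops a letter and rebuilds the result by a comprehension; same side effect on letters, same return value.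
import Mathlib
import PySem

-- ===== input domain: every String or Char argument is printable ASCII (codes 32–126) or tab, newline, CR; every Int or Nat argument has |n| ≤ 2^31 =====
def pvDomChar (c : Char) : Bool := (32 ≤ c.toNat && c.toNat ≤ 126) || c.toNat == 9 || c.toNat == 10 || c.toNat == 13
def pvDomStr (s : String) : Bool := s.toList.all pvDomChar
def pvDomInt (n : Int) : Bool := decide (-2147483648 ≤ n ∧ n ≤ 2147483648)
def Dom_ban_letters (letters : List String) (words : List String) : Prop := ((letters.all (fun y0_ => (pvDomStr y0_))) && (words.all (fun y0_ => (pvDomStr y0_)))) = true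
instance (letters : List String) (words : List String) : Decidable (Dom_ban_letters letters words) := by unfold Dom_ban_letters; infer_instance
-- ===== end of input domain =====

-- B: iterative while-loop (pop a letter, refilter) instead of A's recursion; same value, same mutation of letters — simpler, not faster.
-- ===== PORT A =====
def ban_letters (letters : List String) (words : List String) : List String :=
  if h : letters = [] then words
  else
    let letter := letters.getLast h
    let result := words.foldl (fun res w => if PySem.Str.isIn letter w then res else res ++ [w]) []
    ban_letters letters.dropLast result
termination_by letters.length
decreasing_by simpa [List.length_dropLast] using Nat.sub_lt (List.length_pos_of_ne_nil h) Nat.one_pos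

-- ===== PORT B =====
-- the while loop consumes letters from the END (pop), i.e. folds over letters.reverse
def ban_letters_alt (letters : List String) (words : List String) : List String :=
  letters.reverse.foldl (fun res letter => res.filter (fun w => !(PySem.Str.isIn letter w))) words

-- ===== PRECONDITION & SPEC =====
def Spec_ban_letters (letters : List String) (words : List String) (out : List String) : Prop := out = ban_letters_alt letters words
instance (letters : List String) (words : List String) (out : List String) : Decidable (Spec_ban_letters letters words out) := by unfold Spec_ban_letters; infer_instance

-- ===== CLAIM (what is proved, stated in full; the proofs are below) =====
def Claim_equal_ban_letters : Prop := ∀ (letters : List String) (words : List String), Dom_ban_letters letters words → Spec_ban_letters letters words (ban_letters letters words)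

-- ===== LEMMAS AND PROOFS =====

-- ===== VERDICT (by name: the statement is the Claim_ definition above) =====
theorem ban_letters_eq_alt (letters words : List String) :
    ban_letters letters words = ban_letters_alt letters words := by
  induction letters using List.reverseRecOn generalizing words with
  | nil => simp [ban_letters, ban_letters_alt]
  | append_singleton l a ih =>
    rw [ban_letters]
    simp only [List.append_eq_nil_iff, List.cons_ne_self, and_false, dite_false,
      List.getLast_append_singleton, List.dropLast_concat]
    have hflip : ∀ (res : List String) (w : String),
        (if PySem.Str.isIn a w = true then res else res ++ [w])
          = (if (!PySem.Str.isIn a w) = true then res ++ [w] else res) := by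
      intro res w; cases PySem.Str.isIn a w <;> simp
    simp only [hflip]
    rw [PySem.List.foldl_append_if_eq_filter, ih]
    simp [ban_letters_alt]

theorem ban_letters_spec : Claim_equal_ban_letters := by
  intro letters words _
  unfold Spec_ban_letters
  exact ban_letters_eq_alt letters words
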